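-- pv_equiv track=rewrite | github.com/marcuspeh/leetcode-solutions | 1898-maximum-number-of-removable-characters/1898-maximum-number-of-removable-characters.py | isStillSubString
-- ===== SOURCE A (Python) =====
-- def isStillSubString(s, p, removable, k):
--         i = 0
--         j = 0
--         remove = set(removable[:k + 1])
--         while i < len(s) and j < len(p):
--             if i in remove:
--                 i += 1
--                 continue
--             if s[i] == p[j]:
--                 i += 1
--                 j += 1
--             else:
--                 i += 1
--
--         return j == len(p)
-- ===== SOURCE B (Python) =====
-- def isStillSubString(s, p, removable, k):
--     remove = set(removable[:k + 1])
--     # index: for each character, the (increasing) list of its surviving positions in s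
--     pos = {}
--     for i, c in enumerate(s):
--         if i not in remove:
--             pos.setdefault(c, []).append(i)
--     prev = -1
--     for c in p:
--         indices = pos.get(c, [])
--         # binary search: least lo with indices[lo] > prev
--         lo, hi = 0, len(indices)
--         while lo < hi:
--             mid = (lo + hi) // 2
--             if indices[mid] > prev:
--                 hi = mid
--             else:
--                 lo = mid + 1
--         if lo == len(indices):
--             return False
--         prev = indices[lo]
--     return True
-- ===== Notes on version B (the rewrite author's own statement) =====
-- stated objective: alternative
-- what changed: Replaces A's fused two-pointer skip-and-match scan by building a char-to-surviving-positions index table in one pass and then greedily matching p with a hand-written binary search for the first surviving occurrence after the previous match.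
import Mathlib
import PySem

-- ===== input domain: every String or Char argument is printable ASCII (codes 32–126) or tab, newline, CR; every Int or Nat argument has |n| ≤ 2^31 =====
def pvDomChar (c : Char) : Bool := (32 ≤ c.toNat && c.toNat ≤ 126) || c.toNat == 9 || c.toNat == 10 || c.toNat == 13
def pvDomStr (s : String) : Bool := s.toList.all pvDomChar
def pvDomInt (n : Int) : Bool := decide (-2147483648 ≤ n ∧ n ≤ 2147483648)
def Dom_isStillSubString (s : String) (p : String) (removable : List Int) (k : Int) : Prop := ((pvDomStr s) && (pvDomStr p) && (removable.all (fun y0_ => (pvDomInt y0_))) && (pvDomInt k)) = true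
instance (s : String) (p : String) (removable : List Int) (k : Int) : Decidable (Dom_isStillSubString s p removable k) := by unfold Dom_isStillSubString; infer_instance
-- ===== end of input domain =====

-- B replaces A's fused two-pointer scan by a char→surviving-positions index
-- table plus greedy matching with a hand-written binary search (alternative
-- algorithm, same result).

-- ===== PORT A =====
-- A's while loop: state = current index i, remaining suffix of s, remaining
-- suffix of p (Python's j is len(p) minus its length); returns the remaining p.
def pvALoop (remove : PySem.Set Int) (sl : List Char) (i : Int) (pl : List Char) : List Char :=
  match sl, pl with
  | _, [] => []                              -- while exits: j = len(p)
  | [], pl => pl                             -- while exits: i = len(s)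
  | c :: rest, q :: qs =>
    if PySem.Set.contains remove i then pvALoop remove rest (i + 1) (q :: qs)
    else if c = q then pvALoop remove rest (i + 1) qs
    else pvALoop remove rest (i + 1) (q :: qs)

def isStillSubString (s : String) (p : String) (removable : List Int) (k : Int) : Bool :=
  let remove := PySem.Set.ofList (PySem.List.slice removable none (some (k + 1)))
  (pvALoop remove s.toList 0 p.toList).isEmpty      -- j == len(p)

-- ===== PORT B =====
-- the hand-written binary-search loop of Source B (lo, hi are Python ints that are
-- always ≥ 0, carried as Nat; (lo+hi)//2 agrees with Nat division there, and
-- indices[mid] is always in range since lo ≤ mid < hi ≤ len, so getD is exact)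
def pvBisect (indices : List Int) (prev : Int) (lo hi : Nat) : Nat :=
  if _h : lo < hi then
    if prev < indices.getD ((lo + hi) / 2) 0 then pvBisect indices prev lo ((lo + hi) / 2)
    else pvBisect indices prev ((lo + hi) / 2 + 1) hi
  else lo
termination_by hi - lo
decreasing_by all_goals omega

-- the 'for c in p' loop of Source B, threading prev
def pvBLoop (pos : PySem.Dict Char (List Int)) (prev : Int) : List Char → Bool
  | [] => true
  | c :: rest =>
    let indices := pos.getD c []
    let lo := pvBisect indices prev 0 indices.length
    if lo = indices.length then false
    else pvBLoop pos (indices.getD lo 0) rest      -- indices[lo], always in range here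

def isStillSubString_alt (s : String) (p : String) (removable : List Int) (k : Int) : Bool :=
  let remove := PySem.Set.ofList (PySem.List.slice removable none (some (k + 1)))
  -- pos.setdefault(c, []).append(i)  =  pos[c] = pos.get(c, []) + [i]  =  Dict.modify
  let pos := (PySem.List.enumerate s.toList 0).foldl
      (fun d q => if PySem.Set.contains remove q.1 then d else d.modify q.2 [] (· ++ [q.1]))
      PySem.Dict.empty
  pvBLoop pos (-1) p.toList

-- ===== PRECONDITION & SPEC =====
def Spec_isStillSubString (s : String) (p : String) (removable : List Int) (k : Int) (out : Bool) : Prop := out = isStillSubString_alt s p removable k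
instance (s : String) (p : String) (removable : List Int) (k : Int) (out : Bool) : Decidable (Spec_isStillSubString s p removable k out) := by unfold Spec_isStillSubString; infer_instance

-- ===== CLAIM (what is proved, stated in full; the proofs are below) =====
def Claim_equal_isStillSubString : Prop := ∀ (s : String) (p : String) (removable : List Int) (k : Int), Dom_isStillSubString s p removable k → Spec_isStillSubString s p removable k (isStillSubString s p removable k)

-- ===== LEMMAS AND PROOFS =====

-- A's fused match, expressed on the already-filtered character list
def pvMatchRem : List Char → List Char → List Char
  | [], _ => []
  | q :: qs, [] => q :: qs
  | q :: qs, c :: fl => if c = q then pvMatchRem qs fl else pvMatchRem (q :: qs) fl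

-- common intermediate: greedy matching over the surviving (index, char) pairs,
-- taking for each pattern char the first surviving occurrence after prev
def pvFirstAfter (c : Char) (prev : Int) (L : List (Int × Char)) : Option Int :=
  ((L.filter (fun x => decide (prev < x.1) && (x.2 == c))).map (·.1)).head?

def pvGLoop : List Char → Int → List (Int × Char) → Bool
  | [], _, _ => true
  | c :: qs, prev, L =>
    match pvFirstAfter c prev L with
    | none => false
    | some i => pvGLoop qs i L

theorem pvFirstAfter_eq_some {c : Char} {prev : Int} {L : List (Int × Char)} {i : Int}
    (h : pvFirstAfter c prev L = some i) : prev < i ∧ ∃ x ∈ L, x.1 = i := by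
  unfold pvFirstAfter at h
  cases hf : L.filter (fun x => decide (prev < x.1) && (x.2 == c)) with
  | nil => simp [hf] at h
  | cons a t =>
    rw [hf] at h
    simp only [List.map_cons, List.head?_cons, Option.some.injEq] at h
    have ha : a ∈ L.filter (fun x => decide (prev < x.1) && (x.2 == c)) := by
      rw [hf]; exact List.mem_cons_self
    rw [List.mem_filter] at ha
    obtain ⟨hmem, hpred⟩ := ha
    simp only [Bool.and_eq_true, decide_eq_true_eq, beq_iff_eq] at hpred
    exact ⟨h ▸ hpred.1, a, hmem, h⟩

theorem pvFirstAfter_cons_skip {c : Char} {prev : Int} {x : Int × Char} {rest : List (Int × Char)}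
    (h : ¬(prev < x.1) ∨ x.2 ≠ c) :
    pvFirstAfter c prev (x :: rest) = pvFirstAfter c prev rest := by
  unfold pvFirstAfter
  rw [List.filter_cons_of_neg]
  simp only [Bool.and_eq_true, decide_eq_true_eq, beq_iff_eq, not_and_or]
  tauto

theorem pvFirstAfter_cons_hit {c : Char} {prev : Int} {x : Int × Char} {rest : List (Int × Char)}
    (h1 : prev < x.1) (h2 : x.2 = c) :
    pvFirstAfter c prev (x :: rest) = some x.1 := by
  unfold pvFirstAfter
  rw [List.filter_cons_of_pos (by simp [h1, h2])]
  simp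

-- skipping a pair whose index is already ≤ prev does not change the greedy loop
theorem pvGLoop_cons_le (x : Int × Char) (rest : List (Int × Char)) (pl : List Char)
    (prev : Int) (hx : x.1 ≤ prev) :
    pvGLoop pl prev (x :: rest) = pvGLoop pl prev rest := by
  induction pl generalizing prev with
  | nil => rfl
  | cons c qs ih =>
    have hskip := pvFirstAfter_cons_skip (c := c) (prev := prev) (x := x) (rest := rest)
      (Or.inl (by omega))
    cases hf : pvFirstAfter c prev rest with
    | none => simp [pvGLoop, hskip, hf]
    | some i =>
      have hi := (pvFirstAfter_eq_some hf).1
      simp [pvGLoop, hskip, hf, ih i (by omega)]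

-- A's loop computes the fused match over the filtered suffix of s starting at index i
theorem pvALoop_eq_matchRem (remove : PySem.Set Int) (sl : List Char) (i : Int) (pl : List Char) :
    pvALoop remove sl i pl =
      pvMatchRem pl (((PySem.List.enumerate sl i).filter
        (fun ic => !(PySem.Set.contains remove ic.1))).map (·.2)) := by
  induction sl generalizing i pl with
  | nil => cases pl <;> simp [pvALoop, pvMatchRem, PySem.List.enumerate_nil]
  | cons c rest ih =>
    cases pl with
    | nil => simp [pvALoop, pvMatchRem]
    | cons q qs =>
      rw [PySem.List.enumerate_cons]
      by_cases h : i ∈ remove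
      · simp [pvALoop, PySem.Set.contains, h, ih]
      · by_cases hc : c = q <;>
          simp [pvALoop, PySem.Set.contains, h, hc, pvMatchRem, ih]

-- the fused greedy match equals the prev-threaded greedy loop
theorem pvMatchRem_eq_gLoop (L : List (Int × Char)) (hs : L.Pairwise (fun a b => a.1 < b.1))
    (pl : List Char) (prev : Int) (hprev : ∀ x ∈ L, prev < x.1) :
    (pvMatchRem pl (L.map (·.2))).isEmpty = pvGLoop pl prev L := by
  induction L generalizing pl prev with
  | nil =>
    cases pl with
    | nil => rfl
    | cons c qs => simp [pvMatchRem, pvGLoop, pvFirstAfter]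
  | cons x rest ih =>
    have hrest : ∀ y ∈ rest, x.1 < y.1 := fun y hy => (List.pairwise_cons.mp hs).1 y hy
    have hsrest := (List.pairwise_cons.mp hs).2
    cases pl with
    | nil => simp [pvMatchRem, pvGLoop]
    | cons c qs =>
      have hpx : prev < x.1 := hprev x List.mem_cons_self
      by_cases hc : x.2 = c
      · -- x is the first surviving occurrence of c after prev: both take it
        rw [pvGLoop]
        rw [pvFirstAfter_cons_hit hpx hc]
        simp only [List.map_cons]
        rw [pvMatchRem, if_pos hc]
        rw [pvGLoop_cons_le x rest qs x.1 le_rfl]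
        exact ih hsrest qs x.1 hrest
      · -- both skip x
        rw [pvGLoop]
        rw [pvFirstAfter_cons_skip (Or.inr hc)]
        have hfc : List.filter (fun a => decide (prev < a.1) && (a.2 == c)) rest
            = List.filter (fun a => decide (x.1 < a.1) && (a.2 == c)) rest :=
          List.filter_congr (fun a ha => by
            have h1 : prev < a.1 := hprev a (List.mem_cons_of_mem x ha)
            have h2 : x.1 < a.1 := hrest a ha
            simp [h1, h2])
        have hcongr : pvFirstAfter c prev rest = pvFirstAfter c x.1 rest := by
          unfold pvFirstAfter; rw [hfc]
        rw [hcongr]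
        simp only [List.map_cons]
        rw [pvMatchRem, if_neg hc]
        rw [ih hsrest (c :: qs) x.1 hrest]
        rw [pvGLoop]
        cases hf : pvFirstAfter c x.1 rest with
        | none => rfl
        | some i =>
          have hi := (pvFirstAfter_eq_some hf).1
          simp only
          rw [pvGLoop_cons_le x rest qs i (by omega)]

-- the binary search returns the split point of "≤ prev" / "> prev" on a sorted list
theorem pvBisect_spec (indices : List Int) (prev : Int)
    (hs : indices.Pairwise (· < ·)) :
    ∀ (lo hi : Nat), lo ≤ hi → hi ≤ indices.length →
    (∀ j (hj : j < indices.length), j < lo → indices[j] ≤ prev) →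
    (∀ j (hj : j < indices.length), hi ≤ j → prev < indices[j]) →
    pvBisect indices prev lo hi ≤ indices.length ∧
    (∀ j (hj : j < indices.length), j < pvBisect indices prev lo hi → indices[j] ≤ prev) ∧
    (∀ j (hj : j < indices.length), pvBisect indices prev lo hi ≤ j → prev < indices[j]) := by
  intro lo hi
  induction lo, hi using pvBisect.induct indices prev with
  | case1 lo hi hlt hcmp ih =>
    intro hlohi hhi hbelow habove
    rw [pvBisect, dif_pos hlt, if_pos hcmp]
    have hmid : (lo + hi) / 2 < indices.length := by omega
    refine ih (by omega) (by omega) hbelow (fun j hj h1 => ?_)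
    have hmono : indices[(lo + hi) / 2] ≤ indices[j] := by
      rcases Nat.eq_or_lt_of_le h1 with h | h
      · simp [h]
      · exact le_of_lt (List.pairwise_iff_getElem.mp hs _ _ hmid hj h)
    have : indices.getD ((lo + hi) / 2) 0 = indices[(lo + hi) / 2] :=
      List.getD_eq_getElem indices 0 hmid
    omega
  | case2 lo hi hlt hcmp ih =>
    intro hlohi hhi hbelow habove
    rw [pvBisect, dif_pos hlt, if_neg hcmp]
    have hmid : (lo + hi) / 2 < indices.length := by omega
    have hgd : indices.getD ((lo + hi) / 2) 0 = indices[(lo + hi) / 2] :=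
      List.getD_eq_getElem indices 0 hmid
    refine ih (by omega) hhi (fun j hj h1 => ?_) habove
    rcases Nat.lt_or_ge j ((lo + hi) / 2) with h | h
    · exact le_of_lt (lt_of_lt_of_le (List.pairwise_iff_getElem.mp hs _ _ hj hmid h) (by omega))
    · have : j = (lo + hi) / 2 := by omega
      subst this; omega
  | case3 lo hi hge =>
    intro hlohi hhi hbelow habove
    rw [pvBisect, dif_neg hge]
    exact ⟨by omega, fun j hj h => hbelow j hj h, fun j hj h => habove j hj (by omega)⟩

-- on a sorted list the split point names the "> prev" filter as a drop
theorem pvFilter_eq_drop (I : List Int) (prev : Int) (r : Nat) (hr : r ≤ I.length)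
    (hb : ∀ j (hj : j < I.length), j < r → I[j] ≤ prev)
    (ha : ∀ j (hj : j < I.length), r ≤ j → prev < I[j]) :
    I.filter (fun i => decide (prev < i)) = I.drop r := by
  conv_lhs => rw [← List.take_append_drop r I]
  rw [List.filter_append]
  have h1 : (I.take r).filter (fun i => decide (prev < i)) = [] := by
    rw [List.filter_eq_nil_iff]
    intro a hmem
    obtain ⟨j, hj, hja⟩ := List.mem_iff_getElem.mp hmem
    have hjr : j < r := by have : (I.take r).length = min r I.length := List.length_take; omega
    have hjI : j < I.length := by omega
    have : (I.take r)[j] = I[j]'hjI := List.getElem_take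
    have := hb j hjI hjr
    simp only [decide_eq_true_eq]
    omega
  have h2 : (I.drop r).filter (fun i => decide (prev < i)) = I.drop r := by
    rw [List.filter_eq_self]
    intro a hmem
    obtain ⟨j, hj, hja⟩ := List.mem_iff_getElem.mp hmem
    have hlen : (I.drop r).length = I.length - r := List.length_drop
    have hjI : r + j < I.length := by omega
    have : (I.drop r)[j] = I[r + j]'hjI := by
      simp [List.getElem_drop]
    have := ha (r + j) hjI (by omega)
    simp only [decide_eq_true_eq]
    omega
  rw [h1, h2, List.nil_append]

theorem pvFirstAfter_eq_head (c : Char) (prev : Int) (L : List (Int × Char)) :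
    pvFirstAfter c prev L =
      (((L.filter (fun x => x.2 == c)).map (·.1)).filter (fun i => decide (prev < i))).head? := by
  unfold pvFirstAfter
  rw [List.filter_map, ← List.filter_filter]
  rfl

-- B's per-character loop equals the greedy loop over the surviving pairs
theorem pvBLoop_eq_gLoop (pos : PySem.Dict Char (List Int)) (L : List (Int × Char))
    (hs : L.Pairwise (fun a b => a.1 < b.1))
    (hpos : ∀ c, pos.getD c [] = (L.filter (fun x => x.2 == c)).map (·.1))
    (pl : List Char) (prev : Int) :
    pvBLoop pos prev pl = pvGLoop pl prev L := by
  induction pl generalizing prev with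
  | nil => rfl
  | cons c rest ih =>
    rw [pvBLoop, pvGLoop]
    set I := pos.getD c [] with hI
    have hIL : I = (L.filter (fun x => x.2 == c)).map (·.1) := hpos c
    have hsI : I.Pairwise (· < ·) := by
      rw [hIL]
      exact (List.pairwise_map).mpr ((hs.filter _))
    set r := pvBisect I prev 0 I.length with hr
    obtain ⟨hrle, hb, ha⟩ := pvBisect_spec I prev hsI 0 I.length (by omega) le_rfl
      (by omega) (fun j hj h => absurd hj (by omega))
    have hdrop : I.filter (fun i => decide (prev < i)) = I.drop r := pvFilter_eq_drop I prev r hrle hb ha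
    have hfa : pvFirstAfter c prev L = I[r]? := by
      rw [pvFirstAfter_eq_head, ← hIL, hdrop, List.head?_drop]
    by_cases hcase : r = I.length
    · have : I[r]? = none := by rw [List.getElem?_eq_none]; omega
      rw [← hfa] at this
      rw [this, if_pos hcase]
    · have hrlt : r < I.length := by omega
      have : I[r]? = some I[r] := List.getElem?_eq_getElem hrlt
      rw [← hfa] at this
      rw [this]
      simp only [if_neg hcase]
      rw [List.getD_eq_getElem I 0 hrlt]
      exact ih I[r]

-- ===== VERDICT (by name: the statement is the Claim_ definition above) =====
theorem isStillSubString_spec : Claim_equal_isStillSubString := by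
  intro s p removable k _
  unfold Spec_isStillSubString
  show isStillSubString s p removable k = isStillSubString_alt s p removable k
  rw [isStillSubString, isStillSubString_alt]
  set remove := PySem.Set.ofList (PySem.List.slice removable none (some (k + 1))) with hrem
  set L := (PySem.List.enumerate s.toList 0).filter (fun q => !(PySem.Set.contains remove q.1)) with hL
  have hsL : L.Pairwise (fun a b => a.1 < b.1) :=
    (PySem.List.pairwise_lt_enumerate s.toList 0).filter _
  have hprev : ∀ x ∈ L, (-1 : Int) < x.1 := by
    intro x hx
    have hx' : x ∈ PySem.List.enumerate s.toList 0 := List.mem_of_mem_filter hx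
    obtain ⟨m, hm, hxm⟩ := (PySem.List.mem_enumerate_iff _ _ _).mp hx'
    subst hxm; simp; omega
  -- A's side: fused scan = greedy loop over L
  rw [pvALoop_eq_matchRem, ← hL, pvMatchRem_eq_gLoop L hsL p.toList (-1) hprev]
  -- B's side: characterise the built index table
  have hfun : (fun (d : PySem.Dict Char (List Int)) (q : Int × Char) =>
      if PySem.Set.contains remove q.1 then d else d.modify q.2 [] (· ++ [q.1]))
      = (fun d q => if (!PySem.Set.contains remove q.1) then d.modify q.2 [] (· ++ [q.1]) else d) := by
    funext d q
    cases PySem.Set.contains remove q.1 <;> simp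
  rw [hfun, ← List.foldl_filter, ← hL]
  have hswap : L.foldl (fun d q => d.modify q.2 [] (· ++ [q.1])) PySem.Dict.empty
      = (L.map Prod.swap).foldl (fun d q => d.modify q.1 [] (· ++ [q.2])) PySem.Dict.empty := by
    rw [List.foldl_map]
    rfl
  rw [hswap]
  refine (pvBLoop_eq_gLoop _ L hsL (fun c => ?_) p.toList (-1)).symm
  rw [PySem.Dict.getD_foldl_modify_append]
  have hfm : (L.map Prod.swap).filter (fun q => q.1 == c)
      = (L.filter (fun x => x.2 == c)).map Prod.swap := List.filter_map
  rw [hfm, List.map_map, PySem.Dict.getD_empty, List.nil_append]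
  rfl
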